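-- pv_equiv track=rewrite | github.com/ktjayamanna/leetcode-cpp | exhaustive_outcomes/npr.py | npr
-- ===== SOURCE A (Python) =====
-- def npr(items, r):
--   if len(items) < r:
--     return []
--   if r == 0:
--     return [[]]
--   first = items[0]
--   without_first = []
--   with_first = []
--   for perm in npr(items[1:], r - 1):
--     for i in range(len(perm) + 1):
--       with_first.append(
--         perm[0 : i] + [first] + perm[ i:]
--       )
--   without_first = npr(items[1:], r)
--   return with_first + without_first
-- ===== SOURCE B (Python) =====
-- def npr(items, r):
--     # Bottom-up DP over suffixes: after folding in the last t items,
--     # row[j] == npr(items[n-t:], j); each (suffix, j) subproblem is built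
--     # exactly once instead of A's overlapping recursion.
--     if r < 0 or r > len(items):
--         return []
--     row = [[[]]] + [[] for _ in range(r)]
--     for x in reversed(items):
--         row = [[[]]] + [
--             [p[0:k] + [x] + p[k:] for p in row[j - 1] for k in range(len(p) + 1)]
--             + row[j]
--             for j in range(1, r + 1)
--         ]
--     return row[r]
-- ===== Notes on version B (the rewrite author's own statement) =====
-- stated objective: alternative
-- what changed: Replaces A's overlapping top-down recursion (each (suffix, j) subproblem recomputed binomially many times) with a bottom-up DP over suffixes that builds each distinct subproblem's permutation list exactly once.
import Mathlib
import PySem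

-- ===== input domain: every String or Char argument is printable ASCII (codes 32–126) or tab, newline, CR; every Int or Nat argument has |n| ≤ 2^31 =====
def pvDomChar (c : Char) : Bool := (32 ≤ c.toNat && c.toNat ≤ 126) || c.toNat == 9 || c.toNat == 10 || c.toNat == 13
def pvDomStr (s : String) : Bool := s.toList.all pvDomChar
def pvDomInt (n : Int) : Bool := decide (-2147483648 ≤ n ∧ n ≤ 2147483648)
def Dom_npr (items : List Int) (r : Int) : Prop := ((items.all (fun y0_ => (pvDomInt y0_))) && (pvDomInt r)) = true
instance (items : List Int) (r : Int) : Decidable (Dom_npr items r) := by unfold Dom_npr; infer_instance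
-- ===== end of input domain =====

-- B replaces A's overlapping recursion by a bottom-up DP over suffixes that builds each
-- distinct (suffix, j) subproblem once (objective: alternative algorithm, same results).

-- ===== PORT A =====
-- Literal transliteration of A's recursion; the `[] =>` branch is where Python evaluates
-- items[0] on an empty list and raises IndexError (reachable only for r < 0, outside Pre_).
def npr (items : List Int) (r : Int) : List (List Int) :=
  if (items.length : Int) < r then []
  else if r = 0 then [[]]
  else
    match items with
    | [] => []
    | first :: rest =>
      let with_first := (npr rest (r - 1)).foldl (fun acc perm =>
        (PySem.List.pyRange 0 ((perm.length : Int) + 1) 1).foldl (fun acc2 i =>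
          acc2 ++ [PySem.List.slice perm (some 0) (some i) ++ [first] ++
                   PySem.List.slice perm (some i) none]) acc) []
      let without_first := npr rest r
      with_first ++ without_first

-- ===== PORT B =====
-- [p[0:k] + [x] + p[k:] for k in range(len(p)+1)]
def nprInsAll (x : Int) (p : List Int) : List (List Int) :=
  (PySem.List.pyRange 0 ((p.length : Int) + 1) 1).map (fun k =>
    PySem.List.slice p (some 0) (some k) ++ [x] ++ PySem.List.slice p (some k) none)

-- one loop iteration: row for suffix x::s from the row for suffix s
-- (row[j-1] / row[j] are always in range, so pyGetD's default is never used)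
def nprStep (r : Int) (x : Int) (row : List (List (List Int))) : List (List (List Int)) :=
  [[]] :: (PySem.List.pyRange 1 (r + 1) 1).map (fun j =>
    (PySem.List.pyGetD row (j - 1) []).flatMap (nprInsAll x) ++ PySem.List.pyGetD row j [])

def npr_alt (items : List Int) (r : Int) : List (List Int) :=
  if r < 0 ∨ (items.length : Int) < r then []
  else PySem.List.pyGetD (items.foldr (nprStep r) ([[]] :: List.replicate r.toNat [])) r []

-- ===== PRECONDITION & SPEC =====
-- Pre_ excludes exactly r < 0, where Python A raises IndexError (items[0] on an empty suffix).
def Pre_npr (items : List Int) (r : Int) : Prop := 0 ≤ r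
instance (items : List Int) (r : Int) : Decidable (Pre_npr items r) := by unfold Pre_npr; infer_instance
def pvWitness_npr : List Int × Int := ([1, 2, 3], 2)

def Spec_npr (items : List Int) (r : Int) (out : List (List Int)) : Prop := out = npr_alt items r
instance (items : List Int) (r : Int) (out : List (List Int)) : Decidable (Spec_npr items r out) := by unfold Spec_npr; infer_instance

-- ===== CLAIM (what is proved, stated in full; the proofs are below) =====
def Claim_equal_npr : Prop := ∀ (items : List Int) (r : Int), Dom_npr items r → Pre_npr items r → Spec_npr items r (npr items r)

-- ===== LEMMAS AND PROOFS =====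

-- A returns [] as soon as the suffix is shorter than r
lemma npr_eq_nil_of_lt (items : List Int) (r : Int) (h : (items.length : Int) < r) :
    npr items r = [] := by
  unfold npr; simp [h]

-- the with_first double loop is a flatMap of insertion lists
lemma with_first_eq (l : List (List Int)) (first : Int) :
    l.foldl (fun acc perm =>
        (PySem.List.pyRange 0 ((perm.length : Int) + 1) 1).foldl (fun acc2 i =>
          acc2 ++ [PySem.List.slice perm (some 0) (some i) ++ [first] ++
                   PySem.List.slice perm (some i) none]) acc) [] =
      l.flatMap (nprInsAll first) := by
  have hbody : (fun (acc : List (List Int)) (perm : List Int) =>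
      (PySem.List.pyRange 0 ((perm.length : Int) + 1) 1).foldl (fun acc2 i =>
          acc2 ++ [PySem.List.slice perm (some 0) (some i) ++ [first] ++
                   PySem.List.slice perm (some i) none]) acc) =
      (fun acc perm => acc ++ nprInsAll first perm) := by
    funext acc perm
    rw [PySem.List.foldl_append_singleton_eq_map]
    simp [nprInsAll]
  rw [hbody, PySem.List.foldl_append_eq_flatMap]
  simp

-- core invariant: the folded row holds npr of the suffix at every index ≤ r
lemma row_spec (rN : Nat) (items : List Int) :
    ∀ j : Nat, j ≤ rN →
      (items.foldr (nprStep (rN : Int)) ([[]] :: List.replicate rN ([] : List (List Int)))).getD j [] =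
        npr items (j : Int) := by
  induction items with
  | nil =>
    intro j hj
    match j, hj with
    | 0, _ =>
      simp [npr]
    | Nat.succ s, hj =>
      have : ((List.length ([] : List Int)) : Int) < ((s + 1 : Nat) : Int) := by
        simp
      rw [npr_eq_nil_of_lt _ _ this]
      simp [List.getD]
  | cons x rest ih =>
    intro j hj
    match j, hj with
    | 0, _ =>
      have h0 : ¬ ((List.length (x :: rest) : Int) < (0 : Int)) := by omega
      simp only [List.foldr_cons, nprStep, List.getD_cons_zero]
      rw [npr]
      simp only [Int.natCast_zero]
      rw [if_neg h0]
      simp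
    | Nat.succ s, hj =>
      -- left side: index s+1 of the freshly built row
      have hs : s < rN := by omega
      simp only [List.foldr_cons, nprStep]
      have hrange : PySem.List.pyRange 1 ((rN : Int) + 1) 1 =
          (List.range rN).map (fun k : Nat => (1 : Int) + (k : Int)) := by
        rw [PySem.List.pyRange_one, show (((rN : Int) + 1 - 1)).toNat = rN from by omega]
      rw [hrange, List.map_map, List.getD_cons_succ, List.getD_eq_getElem?_getD,
        List.getElem?_map, List.getElem?_range hs]
      simp only [Option.map_some, Option.getD_some, Function.comp_apply, add_sub_cancel_left]
      have e1 : PySem.List.pyGetD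
          (rest.foldr (nprStep (rN : Int)) ([[]] :: List.replicate rN [])) ((s : Int)) [] =
          npr rest (s : Int) := by
        rw [PySem.List.pyGetD_natCast]; exact ih s (by omega)
      have e2 : PySem.List.pyGetD
          (rest.foldr (nprStep (rN : Int)) ([[]] :: List.replicate rN [])) ((1 : Int) + s) [] =
          npr rest ((s + 1 : Nat) : Int) := by
        have : ((1 : Int) + s) = ((s + 1 : Nat) : Int) := by push_cast; ring
        rw [this, PySem.List.pyGetD_natCast]
        exact_mod_cast ih (s + 1) hj
      rw [e1, e2]
      -- right side: unfold npr once
      by_cases hlen : ((List.length (x :: rest) : Int) < ((s + 1 : Nat) : Int))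
      · have h1 : ((rest.length : Int) < (s : Int)) := by
          simp only [List.length_cons] at hlen; push_cast at hlen ⊢; omega
        have h2 : ((rest.length : Int) < ((s + 1 : Nat) : Int)) := by
          simp only [List.length_cons] at hlen; push_cast at hlen ⊢; omega
        rw [npr_eq_nil_of_lt _ _ hlen, npr_eq_nil_of_lt _ _ h1, npr_eq_nil_of_lt _ _ h2]
        simp
      · have hne : ((s + 1 : Nat) : Int) ≠ 0 := by push_cast; omega
        rw [npr]
        simp only [hlen, if_false, hne, if_false]
        have harg : ((s + 1 : Nat) : Int) - 1 = (s : Int) := by push_cast; ring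
        rw [harg, with_first_eq]

-- ===== VERDICT (by name: the statement is the Claim_ definition above) =====
theorem npr_spec : Claim_equal_npr := by
  intro items r _ hpre
  unfold Spec_npr npr_alt
  by_cases hbig : (items.length : Int) < r
  · rw [if_pos (Or.inr hbig), npr_eq_nil_of_lt _ _ hbig]
  · have hr : ¬ (r < 0 ∨ (items.length : Int) < r) := by
      have hp : (0 : Int) ≤ r := hpre
      omega
    rw [if_neg hr]
    have hcast : r = ((r.toNat : Nat) : Int) := (Int.toNat_of_nonneg hpre).symm
    rw [hcast, PySem.List.pyGetD_natCast]
    exact (row_spec r.toNat items r.toNat le_rfl).symm
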